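-- pv_equiv track=rewrite | github.com/tsukasamiyashita/PdfEditMiya | common.py | merge_2d_arrays_horizontally
-- ===== SOURCE A (Python) =====
-- def merge_2d_arrays_horizontally(arrays_list):
--     if not arrays_list: return []
--     max_rows = max((len(arr) for arr in arrays_list), default=0)
--     if max_rows == 0:
--         max_rows = 1
--     merged = []
--     # 抽出範囲にテキストデータが無い場合でも、最低1列の空のセル（列）を保証する
--     region_max_cols = [max((max((len(row) for row in arr), default=0) if arr else 0), 1) for arr in arrays_list]
--     for r in range(max_rows):
--         merged_row = []
--         for i, arr in enumerate(arrays_list):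
--             max_c = region_max_cols[i]
--             if arr and r < len(arr):
--                 row_data = list(arr[r])
--                 row_data += [""] * (max_c - len(row_data))
--                 merged_row.extend(row_data)
--             else: merged_row.extend([""] * max_c)
--         merged.append(merged_row)
--     return merged
-- ===== SOURCE B (Python) =====
-- def merge_2d_arrays_horizontally(arrays_list):
--     if not arrays_list:
--         return []
--     # Fold over the arrays, gluing each one's column block onto the RIGHT EDGE of
--     # the accumulated table, growing it downward with blank rows as needed.
--     merged = [[]]
--     width = 0
--     for arr in arrays_list:
--         w = max(max((len(row) for row in arr), default=0), 1)
--         while len(merged) < len(arr):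
--             merged.append([""] * width)
--         for r in range(len(merged)):
--             if r < len(arr):
--                 row = list(arr[r])
--                 merged[r] = merged[r] + row + [""] * (w - len(row))
--             else:
--                 merged[r] = merged[r] + [""] * w
--         width += w
--     return merged
-- ===== Notes on version B (the rewrite author's own statement) =====
-- stated objective: alternative
-- what changed: B inverts the traversal: instead of A's row-index outer loop that scans every array per row (with precomputed max_rows/region_max_cols tables), B folds once over the arrays, gluing each array's column block onto the right edge of an accumulated table and growing it downward with blank rows of the running width.
import Mathlib
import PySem

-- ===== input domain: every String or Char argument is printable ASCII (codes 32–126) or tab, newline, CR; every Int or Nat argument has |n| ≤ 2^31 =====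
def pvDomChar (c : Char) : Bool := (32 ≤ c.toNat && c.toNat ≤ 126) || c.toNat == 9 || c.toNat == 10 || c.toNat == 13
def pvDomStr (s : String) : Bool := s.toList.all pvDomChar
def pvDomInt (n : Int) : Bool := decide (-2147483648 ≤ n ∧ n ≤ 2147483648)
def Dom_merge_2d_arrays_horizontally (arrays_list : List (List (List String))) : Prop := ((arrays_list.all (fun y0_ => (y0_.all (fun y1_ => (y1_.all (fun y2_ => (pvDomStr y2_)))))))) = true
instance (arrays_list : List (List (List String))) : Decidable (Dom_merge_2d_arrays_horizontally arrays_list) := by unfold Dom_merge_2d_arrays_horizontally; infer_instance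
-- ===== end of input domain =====

-- B folds once over the arrays, gluing each array's padded column block onto the right
-- edge of an accumulated table (vs A's row-index outer loop); return values proved equal.

-- ===== PORT A =====
def merge_2d_arrays_horizontally (arrays_list : List (List (List String))) : List (List String) :=
  if arrays_list = [] then [] else
    let m0 := arrays_list.foldl (fun m arr => max m arr.length) 0
    let max_rows := if m0 = 0 then 1 else m0
    let region_max_cols := arrays_list.map (fun arr =>
      max (if arr ≠ [] then arr.foldl (fun m row => max m row.length) 0 else 0) 1)
    (List.range max_rows).map (fun r =>
      (arrays_list.zip region_max_cols).foldl (fun merged_row p =>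
        if p.1 ≠ [] ∧ r < p.1.length then
          merged_row ++ ((p.1.getD r []) ++ List.replicate (p.2 - (p.1.getD r []).length) "")
        else merged_row ++ List.replicate p.2 "") [])

-- ===== PORT B =====
-- state of B's fold: the accumulated table `merged` and the running total `width`;
-- the `++ List.replicate ...` part renders Python's
-- `while len(merged) < len(arr): merged.append([""] * width)` extension, and the map
-- over the range renders the in-place `merged[r] = merged[r] + ...` loop.
def pvGlue : List (List (List String)) → List (List String) → Nat → List (List String)
  | [], merged, _ => merged
  | arr :: rest, merged, width =>
    pvGlue rest
      ((List.range ((merged ++ List.replicate (arr.length - merged.length)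
          (List.replicate width "")).length)).map (fun r =>
        (merged ++ List.replicate (arr.length - merged.length)
          (List.replicate width "")).getD r [] ++
          (if r < arr.length then
            (arr.getD r []) ++ List.replicate
              ((max (arr.foldl (fun m row => max m row.length) 0) 1) - (arr.getD r []).length) ""
          else List.replicate (max (arr.foldl (fun m row => max m row.length) 0) 1) "")))
      (width + max (arr.foldl (fun m row => max m row.length) 0) 1)

def merge_2d_arrays_horizontally_alt (arrays_list : List (List (List String))) : List (List String) :=
  if arrays_list = [] then [] else pvGlue arrays_list [[]] 0

-- ===== PRECONDITION & SPEC =====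
def Spec_merge_2d_arrays_horizontally (arrays_list : List (List (List String))) (out : List (List String)) : Prop := out = merge_2d_arrays_horizontally_alt arrays_list
instance (arrays_list : List (List (List String))) (out : List (List String)) : Decidable (Spec_merge_2d_arrays_horizontally arrays_list out) := by unfold Spec_merge_2d_arrays_horizontally; infer_instance

-- ===== CLAIM (what is proved, stated in full; the proofs are below) =====
def Claim_equal_merge_2d_arrays_horizontally : Prop := ∀ (arrays_list : List (List (List String))), Dom_merge_2d_arrays_horizontally arrays_list → Spec_merge_2d_arrays_horizontally arrays_list (merge_2d_arrays_horizontally arrays_list)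

-- ===== LEMMAS AND PROOFS =====

-- proof-side vocabulary
def pvW (arr : List (List String)) : Nat := max (arr.foldl (fun m row => max m row.length) 0) 1

def pvSeg (r : Nat) (arr : List (List String)) : List String :=
  if r < arr.length then (arr.getD r []) ++ List.replicate (pvW arr - (arr.getD r []).length) ""
  else List.replicate (pvW arr) ""

def pvRow (al : List (List (List String))) (r : Nat) : List String :=
  (al.map (pvSeg r)).flatten

def pvMaxLen (al : List (List (List String))) : Nat :=
  al.foldl (fun m arr => max m arr.length) 0

def pvSumW (al : List (List (List String))) : Nat := (al.map pvW).sum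

lemma pv_foldl_max_init_le {α : Type} (f : α → Nat) :
    ∀ (l : List α) (m : Nat), m ≤ l.foldl (fun m a => max m (f a)) m
  | [], _ => le_refl _
  | b :: u, m =>
    le_trans (le_max_left m (f b)) (pv_foldl_max_init_le f u (max m (f b)))

lemma pv_foldl_max_mem {α : Type} (f : α → Nat) :
    ∀ (l : List α) (m : Nat) (x : α), x ∈ l → f x ≤ l.foldl (fun m a => max m (f a)) m
  | b :: u, m, x, hx => by
    simp only [List.foldl_cons]
    rcases List.mem_cons.mp hx with h | h
    · subst h; exact le_trans (le_max_right m (f x)) (pv_foldl_max_init_le f u _)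
    · exact pv_foldl_max_mem f u _ x h

lemma pv_foldl_max_mono {α : Type} (f : α → Nat) :
    ∀ (l : List α) (m n : Nat), m ≤ n →
      l.foldl (fun m a => max m (f a)) m ≤ l.foldl (fun m a => max m (f a)) n
  | [], _, _, h => h
  | b :: u, m, n, h => pv_foldl_max_mono f u _ _ (by show max m (f b) ≤ max n (f b); omega)

lemma pvMaxLen_mem {al : List (List (List String))} {arr : List (List String)}
    (h : arr ∈ al) : arr.length ≤ pvMaxLen al :=
  pv_foldl_max_mem (fun a : List (List String) => a.length) al 0 arr h

lemma pvMaxLen_cons_le (a : List (List String)) (t : List (List (List String))) :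
    pvMaxLen t ≤ pvMaxLen (a :: t) := by
  unfold pvMaxLen
  simp only [List.foldl_cons]
  exact pv_foldl_max_mono (fun a : List (List String) => a.length) t 0 _ (Nat.zero_le _)

lemma pvRow_big {al : List (List (List String))} {r : Nat} (h : pvMaxLen al ≤ r) :
    pvRow al r = List.replicate (pvSumW al) "" := by
  unfold pvRow pvSumW
  induction al with
  | nil => simp
  | cons a t ih =>
    have ha : a.length ≤ r := le_trans (pvMaxLen_mem (List.mem_cons_self)) h
    have ht : pvMaxLen t ≤ r := le_trans (pvMaxLen_cons_le a t) h
    have hseg : pvSeg r a = List.replicate (pvW a) "" := by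
      unfold pvSeg; rw [if_neg (by omega)]
    simp only [List.map_cons, List.flatten_cons, List.sum_cons, hseg, ih ht,
      ← List.replicate_add]

lemma pvMaxLen_append_single (p : List (List (List String))) (arr : List (List String)) :
    pvMaxLen (p ++ [arr]) = max (pvMaxLen p) arr.length := by
  unfold pvMaxLen; rw [List.foldl_append]; rfl

lemma pvRow_append_single (p : List (List (List String))) (arr : List (List String)) (r : Nat) :
    pvRow (p ++ [arr]) r = pvRow p r ++ pvSeg r arr := by
  unfold pvRow; simp

lemma range_map_getD {α : Type} (f : Nat → α) (m r : Nat) (d : α) (h : r < m) :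
    ((List.range m).map f).getD r d = f r := by
  rw [List.getD_eq_getElem _ _ (by simpa using h)]
  simp

lemma pvSumW_append_single (p : List (List (List String))) (arr : List (List String)) :
    pvSumW (p ++ [arr]) = pvSumW p + pvW arr := by
  unfold pvSumW; simp

-- the fold invariant: running the glue loop from the table of a processed prefix p
lemma pvGlue_inv : ∀ (al p : List (List (List String))),
    pvGlue al ((List.range (max 1 (pvMaxLen p))).map (pvRow p)) (pvSumW p)
    = (List.range (max 1 (pvMaxLen (p ++ al)))).map (pvRow (p ++ al))
  | [], p => by simp [pvGlue]
  | arr :: rest, p => by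
    rw [pvGlue]
    have hk : max 1 (pvMaxLen p) + (arr.length - max 1 (pvMaxLen p))
        = max (max 1 (pvMaxLen p)) arr.length := by omega
    have hmerged1 :
        ((List.range (max 1 (pvMaxLen p))).map (pvRow p)) ++
          List.replicate (arr.length - ((List.range (max 1 (pvMaxLen p))).map (pvRow p)).length)
            (List.replicate (pvSumW p) "")
        = (List.range (max (max 1 (pvMaxLen p)) arr.length)).map (pvRow p) := by
      rw [List.length_map, List.length_range, ← hk, List.range_add, List.map_append,
        List.map_map]
      congr 1
      refine (List.eq_replicate_iff.mpr ⟨by simp, ?_⟩).symm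
      intro b hb
      simp only [List.mem_map, List.mem_range, Function.comp] at hb
      obtain ⟨i, _, rfl⟩ := hb
      exact pvRow_big (by omega)
    rw [hmerged1]
    have hnn : max (max 1 (pvMaxLen p)) arr.length = max 1 (pvMaxLen (p ++ [arr])) := by
      rw [pvMaxLen_append_single]; omega
    have hmerged2 :
        (List.range ((List.range (max (max 1 (pvMaxLen p)) arr.length)).map (pvRow p)).length).map
          (fun r =>
          ((List.range (max (max 1 (pvMaxLen p)) arr.length)).map (pvRow p)).getD r [] ++
            (if r < arr.length then
              (arr.getD r []) ++ List.replicate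
                ((max (arr.foldl (fun m row => max m row.length) 0) 1) - (arr.getD r []).length) ""
            else List.replicate (max (arr.foldl (fun m row => max m row.length) 0) 1) ""))
        = (List.range (max 1 (pvMaxLen (p ++ [arr])))).map (pvRow (p ++ [arr])) := by
      rw [List.length_map, List.length_range, hnn]
      apply List.map_congr_left
      intro r hr
      rw [List.mem_range] at hr
      rw [range_map_getD _ _ _ _ hr, pvRow_append_single]
      rfl
    rw [hmerged2]
    have hsum : pvSumW p + max (arr.foldl (fun m row => max m row.length) 0) 1
        = pvSumW (p ++ [arr]) := by
      rw [pvSumW_append_single]; rfl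
    rw [hsum, pvGlue_inv rest (p ++ [arr]), List.append_assoc]
    rfl

-- A's per-row fold computes pvRow
lemma pvA_fold_eq (r : Nat) : ∀ (al : List (List (List String))) (acc : List String),
    (al.zip (al.map (fun arr =>
        max (if arr ≠ [] then arr.foldl (fun m row => max m row.length) 0 else 0) 1))).foldl
      (fun merged_row p =>
        if p.1 ≠ [] ∧ r < p.1.length then
          merged_row ++ ((p.1.getD r []) ++ List.replicate (p.2 - (p.1.getD r []).length) "")
        else merged_row ++ List.replicate p.2 "") acc
    = acc ++ pvRow al r
  | [], acc => by simp [pvRow]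
  | a :: t, acc => by
    simp only [List.map_cons, List.zip_cons_cons, List.foldl_cons]
    have hw : max (if a ≠ [] then a.foldl (fun m row => max m row.length) 0 else 0) 1 = pvW a := by
      unfold pvW
      by_cases h : a = [] <;> simp [h]
    have hstep : (if a ≠ [] ∧ r < a.length then
          acc ++ ((a.getD r []) ++ List.replicate
            ((max (if a ≠ [] then a.foldl (fun m row => max m row.length) 0 else 0) 1)
              - (a.getD r []).length) "")
        else acc ++ List.replicate
            (max (if a ≠ [] then a.foldl (fun m row => max m row.length) 0 else 0) 1) "")
        = acc ++ pvSeg r a := by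
      rw [hw]
      unfold pvSeg
      by_cases h : r < a.length
      · have ha : a ≠ [] := by intro e; subst e; simp at h
        rw [if_pos ⟨ha, h⟩, if_pos h]
      · rw [if_neg (fun hc => h hc.2), if_neg h]
    rw [hstep, pvA_fold_eq r t (acc ++ pvSeg r a)]
    simp [pvRow]

-- ===== VERDICT (by name: the statement is the Claim_ definition above) =====
theorem merge_2d_arrays_horizontally_spec : Claim_equal_merge_2d_arrays_horizontally := by
  intro al _
  unfold Spec_merge_2d_arrays_horizontally merge_2d_arrays_horizontally merge_2d_arrays_horizontally_alt
  by_cases h : al = []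
  · simp [h]
  · simp only [if_neg h]
    have hB : pvGlue al [[]] 0 = (List.range (max 1 (pvMaxLen al))).map (pvRow al) := by
      have := pvGlue_inv al []
      simpa [pvMaxLen, pvSumW, pvRow, List.range_succ] using this
    have hmr : (if al.foldl (fun m arr => max m arr.length) 0 = 0 then 1
        else al.foldl (fun m arr => max m arr.length) 0) = max 1 (pvMaxLen al) := by
      unfold pvMaxLen
      by_cases hm : al.foldl (fun m arr => max m arr.length) 0 = 0
      · simp [hm]
      · simp only [if_neg hm]; omega
    rw [hmr, hB]
    exact List.map_congr_left (fun r _ => pvA_fold_eq r al [])
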